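-- pv_equiv track=rewrite | github.com/Wizmann/ACM-ICPC | Codility/Challenges/Fast & Curious/NewMotorway.py | solution
-- ===== SOURCE A (Python) =====
-- MOD = (10 ** 9) + 7
--
-- INF = 10 ** 100
--
-- def solution(A):
--     n = len(A)
--     pre = A[:]
--     for i in range(1, n):
--         pre[i] += pre[i - 1]
--
--     def presum(a, b):
--         if a > b:
--             return 0
--         aa = 0
--         if a - 1 >= 0:
--             aa = pre[a - 1]
--         return pre[b] - aa
--
--     mini = INF
--     for i in range(n - 1):
--         left_cnt = i
--         left_sum = presum(0, i - 1)
--         right_cnt = n - i - 1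
--         right_sum = presum(i + 1, n - 1)
--
--         cur = A[i] * left_cnt - left_sum + \
--               A[-1] * right_cnt - right_sum
--         # print left_cnt, left_sum, right_cnt, right_sum
--         # print cur
--         mini = min(mini, cur)
--
--     return mini % MOD
-- ===== SOURCE B (Python) =====
-- MOD = (10 ** 9) + 7
--
-- INF = 10 ** 100
--
-- def solution(A):
--     # Algebraic closed form: the cost of split i simplifies to
--     # (A[i] - A[-1]) * (i + 1) + (A[-1] * n - sum(A)), so no prefix sums are needed.
--     n = len(A)
--     if n < 2:
--         return INF % MOD
--     last = A[-1]
--     off = last * n - sum(A)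
--     best = min([INF] + [(a - last) * (i + 1) + off for i, a in enumerate(A[:-1])])
--     return best % MOD
-- ===== Notes on version B (the rewrite author's own statement) =====
-- stated objective: simpler
-- what changed: Replaces the prefix-sum array and the presum range-query helper by an algebraic closed form: the left/right range sums cancel, so the cost of split i is (A[i]-A[-1])*(i+1) plus a constant offset, and B just takes the min of these candidate values.
import Mathlib
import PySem

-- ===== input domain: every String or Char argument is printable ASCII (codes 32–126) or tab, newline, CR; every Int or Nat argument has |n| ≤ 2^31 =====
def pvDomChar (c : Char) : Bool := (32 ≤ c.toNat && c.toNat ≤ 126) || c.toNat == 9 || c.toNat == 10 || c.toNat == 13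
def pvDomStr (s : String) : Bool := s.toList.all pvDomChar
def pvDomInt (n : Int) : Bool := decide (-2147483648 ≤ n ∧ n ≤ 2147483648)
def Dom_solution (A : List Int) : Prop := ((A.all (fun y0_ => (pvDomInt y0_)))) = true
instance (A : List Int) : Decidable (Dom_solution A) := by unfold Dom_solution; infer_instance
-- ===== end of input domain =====

-- B drops A's prefix-sum array and its presum range-query helper: the left/right range
-- sums cancel algebraically, so B takes the min of the closed-form per-split costs
-- (A[i]-A[-1])*(i+1) + offset (objective: simpler).

-- ===== PORT A =====
-- the 'pre[i] += pre[i-1]' loop body (indices produced by range(1, n) are always in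
-- range, so the pyGetD default 0 is never used)
def preStep (pre : List Int) (i : Int) : List Int :=
  pre.set i.toNat (PySem.List.pyGetD pre i 0 + PySem.List.pyGetD pre (i - 1) 0)

-- the nested helper 'presum(a, b)'; every call A makes has b within range, so the
-- pyGetD default 0 is never used
def presumA (pre : List Int) (a b : Int) : Int :=
  if a > b then 0
  else
    let aa : Int := if a - 1 ≥ 0 then PySem.List.pyGetD pre (a - 1) 0 else 0
    PySem.List.pyGetD pre b 0 - aa

def solution (A : List Int) : Int :=
  let n : Int := A.length
  let pre := (PySem.List.pyRange 1 n 1).foldl preStep A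
  let mini := (PySem.List.pyRange 0 (n - 1) 1).foldl
    (fun mini i =>
      let leftCnt := i
      let leftSum := presumA pre 0 (i - 1)
      let rightCnt := n - i - 1
      let rightSum := presumA pre (i + 1) (n - 1)
      let cur := PySem.List.pyGetD A i 0 * leftCnt - leftSum
                 + PySem.List.pyGetD A (-1) 0 * rightCnt - rightSum
      min mini cur) (10 ^ 100)
  PySem.Int.mod mini (10 ^ 9 + 7)

-- ===== PORT B =====
-- 'min([INF] + [...])' on a list that contains INF, so the min? is never none and the
-- .getD default 0 is never used
def solution_alt (A : List Int) : Int :=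
  let n : Int := A.length
  if n < 2 then PySem.Int.mod (10 ^ 100) (10 ^ 9 + 7)
  else
    let last := PySem.List.pyGetD A (-1) 0
    let off := last * n - A.sum
    let cand := (PySem.List.enumerate (PySem.List.slice A none (some (-1))) 0).map
      (fun p => (p.2 - last) * (p.1 + 1) + off)
    let best := (PySem.List.min? ((10 ^ 100 : Int) :: cand) (fun y => y)).getD 0
    PySem.Int.mod best (10 ^ 9 + 7)

-- ===== PRECONDITION & SPEC =====
def Spec_solution (A : List Int) (out : Int) : Prop := out = solution_alt A
instance (A : List Int) (out : Int) : Decidable (Spec_solution A out) := by unfold Spec_solution; infer_instance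

-- ===== CLAIM (what is proved, stated in full; the proofs are below) =====
def Claim_equal_solution : Prop := ∀ (A : List Int), Dom_solution A → Spec_solution A (solution A)

-- ===== LEMMAS AND PROOFS =====

theorem getD_set_eq (P : List Int) (k j : Nat) (v : Int) (hk : k < P.length) :
    (P.set k v).getD j 0 = if j = k then v else P.getD j 0 := by
  by_cases h : j = k
  · subst h; simp [List.getD_eq_getElem?_getD, hk]
  · simp [h, List.getD_eq_getElem?_getD, List.getElem?_set_ne (fun hh => h hh.symm)]

-- after folding preStep over range(1, k), the first k entries are prefix sums of A
-- and the rest are untouched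
theorem preFold_spec (A : List Int) (k : Nat) (hk : k ≤ A.length) :
    ((PySem.List.pyRange 1 (k : Int) 1).foldl preStep A).length = A.length ∧
    ∀ j : Nat, j < A.length →
      ((PySem.List.pyRange 1 (k : Int) 1).foldl preStep A).getD j 0 =
        if j < k then (A.take (j + 1)).sum else A.getD j 0 := by
  induction k with
  | zero =>
    rw [PySem.List.pyRange_one_eq_nil (by omega)]
    refine ⟨by simp, fun j hj => by simp⟩
  | succ k ih =>
    by_cases h1 : k = 0
    · subst h1
      rw [PySem.List.pyRange_one_eq_nil (by omega)]
      simp only [List.foldl_nil]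
      refine ⟨by simp, fun j hj => ?_⟩
      split_ifs with h2
      · interval_cases j
        rw [List.sum_take_succ A 0 hj]
        simp [List.getD_eq_getElem?_getD, List.getElem?_eq_getElem hj]
      · rfl
    · have hk1 : (1:Int) ≤ (k:Int) := by omega
      have hsplit : PySem.List.pyRange 1 ((k:Int)+1) 1 = PySem.List.pyRange 1 (k:Int) 1 ++ [(k:Int)] :=
        PySem.List.pyRange_one_succ_right hk1
      obtain ⟨hlen, hget⟩ := ih (by omega)
      push_cast
      rw [hsplit, List.foldl_append]
      set P := (PySem.List.pyRange 1 (k:Int) 1).foldl preStep A with hP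
      have hkl : k < P.length := by omega
      have hstep : preStep P (k:Int) = P.set k ((A.getD k 0) + (A.take k).sum) := by
        unfold preStep
        have e1 : ((k:Int)).toNat = k := by omega
        have e2 : ((k:Int) - 1) = ((k-1 : Nat) : Int) := by omega
        rw [e1, e2]
        simp only [PySem.List.pyGetD_natCast]
        rw [hget k (by omega), hget (k-1) (by omega)]
        have h3 : k - 1 < k := by omega
        simp [h3]
        rw [(by omega : k - 1 + 1 = k)]
      simp only [List.foldl_cons, List.foldl_nil]
      rw [hstep]
      constructor
      · simp [hlen]
      · intro j hj
        rw [getD_set_eq P k j _ hkl]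
        by_cases hjk : j = k
        · subst hjk
          rw [if_pos rfl, if_pos (by omega : j < j + 1), List.sum_take_succ A j hj,
              List.getD_eq_getElem A 0 hj]
          ring
        · rw [hget j hj]
          simp only [hjk, if_false]
          split_ifs with c1 c2 c3 <;> first | rfl | omega

-- A's presum(0, i-1) is the sum of the first i elements
theorem presum_left (A : List Int) (k : Nat) (hk : k ≤ A.length) :
    presumA ((PySem.List.pyRange 1 (A.length : Int) 1).foldl preStep A) 0 ((k : Int) - 1)
      = (A.take k).sum := by
  obtain ⟨hlen, hget⟩ := preFold_spec A A.length le_rfl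
  unfold presumA
  rcases Nat.eq_zero_or_pos k with h0 | h0
  · subst h0; norm_num
  · rw [if_neg (by omega)]
    have e2 : ((k:Int) - 1) = ((k - 1 : Nat) : Int) := by omega
    rw [e2]
    simp only [PySem.List.pyGetD_natCast]
    rw [hget (k-1) (by omega), if_pos (by omega)]
    rw [(by omega : k - 1 + 1 = k)]
    norm_num

-- A's presum(i+1, n-1) is total minus the sum through index i
theorem presum_right (A : List Int) (k : Nat) (hk : k + 1 ≤ A.length - 1) (hn : 2 ≤ A.length) :
    presumA ((PySem.List.pyRange 1 (A.length : Int) 1).foldl preStep A) ((k : Int) + 1) ((A.length : Int) - 1)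
      = A.sum - (A.take (k + 1)).sum := by
  obtain ⟨hlen, hget⟩ := preFold_spec A A.length le_rfl
  unfold presumA
  rw [if_neg (by omega)]
  have e1 : ((k:Int) + 1 - 1) = ((k : Nat) : Int) := by omega
  have e2 : ((A.length : Int) - 1) = ((A.length - 1 : Nat) : Int) := by omega
  rw [if_pos (by omega), e1, e2]
  simp only [PySem.List.pyGetD_natCast]
  rw [hget k (by omega), hget (A.length - 1) (by omega),
      if_pos (by omega), if_pos (by omega), (by omega : A.length - 1 + 1 = A.length)]
  simp

-- A's per-split cost simplifies to B's closed form: the range sums cancel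
theorem cur_closed_form (A : List Int) (hn : 2 ≤ A.length) (i : Int)
    (h0 : 0 ≤ i) (h1 : i < (A.length : Int) - 1) :
    PySem.List.pyGetD A i 0 * i
      - presumA ((PySem.List.pyRange 1 (A.length : Int) 1).foldl preStep A) 0 (i - 1)
      + PySem.List.pyGetD A (-1) 0 * ((A.length : Int) - i - 1)
      - presumA ((PySem.List.pyRange 1 (A.length : Int) 1).foldl preStep A) (i + 1) ((A.length : Int) - 1)
    = (PySem.List.pyGetD A i 0 - PySem.List.pyGetD A (-1) 0) * (i + 1)
      + (PySem.List.pyGetD A (-1) 0 * (A.length : Int) - A.sum) := by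
  set k : Nat := i.toNat with hk
  have hik : i = (k : Int) := by omega
  rw [hik, presum_left A k (by omega), presum_right A k (by omega) hn]
  have hkl : k < A.length := by omega
  have harg : (A.take (k + 1)).sum = (A.take k).sum + PySem.List.pyGetD A (k:Int) 0 := by
    simp only [PySem.List.pyGetD_natCast]
    rw [List.sum_take_succ A k hkl, List.getD_eq_getElem A 0 hkl]
  rw [harg]; ring

-- ===== VERDICT (by name: the statement is the Claim_ definition above) =====
theorem solution_spec : Claim_equal_solution := by
  intro A _
  unfold Spec_solution solution solution_alt
  by_cases h : (A.length : Int) < 2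
  · have hnil : PySem.List.pyRange 0 ((A.length:Int) - 1) 1 = [] :=
      PySem.List.pyRange_one_eq_nil (by omega)
    simp only [hnil, List.foldl_nil, if_pos h]
  · have h2 : 2 ≤ A.length := by omega
    simp only [if_neg h]
    congr 1
    rw [PySem.List.slice_to_neg_one,
        PySem.List.enumerate_eq_map_pyRange A.dropLast 0,
        List.map_map, PySem.List.min?_id_cons, Option.getD_some,
        List.foldl_map]
    have hlen : ((A.dropLast.length : Nat) : Int) = (A.length : Int) - 1 := by
      simp [List.length_dropLast]; omega
    rw [PySem.List.len, hlen]
    refine PySem.List.foldl_congr_mem _ _ _ _ ?_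
    intro acc i hi
    rw [PySem.List.mem_pyRange_one] at hi
    have hd : PySem.List.pyGetD A.dropLast i 0 = PySem.List.pyGetD A i 0 := by
      have hik : i = ((i.toNat : Nat) : Int) := by omega
      rw [hik]
      simp only [PySem.List.pyGetD_natCast]
      have h1 : i.toNat < A.dropLast.length := by simp [List.length_dropLast]; omega
      have h1' : i.toNat < A.length := by omega
      rw [List.getD_eq_getElem _ 0 h1, List.getD_eq_getElem _ 0 h1', List.getElem_dropLast]
    simp only [Function.comp_apply]
    rw [hd, cur_closed_form A h2 i hi.1 hi.2]
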